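-- pv_equiv track=rewrite | github.com/bharathkadur/CodeSignal | The Core/28. Lineup/LineUp.py | solution
-- ===== SOURCE A (Python) =====
-- def solution(commands):
--     n = 4  # Assuming there are 4 students
--     directions = [0] * n  # Initialize directions of students
--     same_direction_count = 0
--
--     for command in commands:
--         for i in range(n):
--             if i == 1:  # Assuming the second student can't tell left from right
--                 if command == 'L':
--                     directions[i] = (directions[i] + 1) % 4
--                 elif command == 'R':
--                     directions[i] = (directions[i] - 1) % 4
--                 elif command == 'A':
--                     directions[i] = (directions[i] + 2) % 4
--             else:
--                 if command == 'L':
--                     directions[i] = (directions[i] - 1) % 4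
--                 elif command == 'R':
--                     directions[i] = (directions[i] + 1) % 4
--                 elif command == 'A':
--                     directions[i] = (directions[i] + 2) % 4
--
--         if len(set(directions)) == 1:
--             same_direction_count += 1
--
--     return same_direction_count
-- ===== SOURCE B (Python) =====
-- def solution(commands):
--     # Students 0,2,3 always share a direction and student 1 mirrors L/R,
--     # so "all same" <=> the (student1 - student0) gap is a multiple of 4.
--     delta = 0
--     count = 0
--     for c in commands:
--         if c == 'L':
--             delta += 2
--         elif c == 'R':
--             delta -= 2
--         if delta % 4 == 0:
--             count += 1
--     return count
-- ===== Notes on version B (the rewrite author's own statement) =====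
-- stated objective: simpler
-- what changed: B drops the 4-element direction array and the set-equality test: it tracks a single integer gap between student 1 and the others (+2 on 'L', -2 on 'R', unchanged otherwise) and counts commands after which the gap is divisible by 4.
import Mathlib
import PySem

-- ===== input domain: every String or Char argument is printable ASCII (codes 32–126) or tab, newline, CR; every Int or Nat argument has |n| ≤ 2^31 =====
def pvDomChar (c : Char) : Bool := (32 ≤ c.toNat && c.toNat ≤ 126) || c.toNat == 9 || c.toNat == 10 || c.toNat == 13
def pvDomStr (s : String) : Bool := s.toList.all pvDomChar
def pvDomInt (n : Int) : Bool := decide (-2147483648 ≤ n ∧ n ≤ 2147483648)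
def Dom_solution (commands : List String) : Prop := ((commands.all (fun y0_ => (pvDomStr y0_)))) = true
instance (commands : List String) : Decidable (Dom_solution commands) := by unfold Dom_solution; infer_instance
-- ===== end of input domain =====

-- B replaces A's 4-element direction array and set-equality test by a single integer gap counter (simpler; same return value).

-- ===== PORT A =====
-- the inner 'for i in range(n)' loop of A, updating directions in place
def solutionStepA (dirs : List Int) (command : String) : List Int :=
  (PySem.List.pyRange 0 4 1).foldl (fun ds i =>
    if i == 1 then
      if command == "L" then PySem.List.pySetD ds i (PySem.Int.mod (PySem.List.pyGetD ds i 0 + 1) 4)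
      else if command == "R" then PySem.List.pySetD ds i (PySem.Int.mod (PySem.List.pyGetD ds i 0 - 1) 4)
      else if command == "A" then PySem.List.pySetD ds i (PySem.Int.mod (PySem.List.pyGetD ds i 0 + 2) 4)
      else ds
    else
      if command == "L" then PySem.List.pySetD ds i (PySem.Int.mod (PySem.List.pyGetD ds i 0 - 1) 4)
      else if command == "R" then PySem.List.pySetD ds i (PySem.Int.mod (PySem.List.pyGetD ds i 0 + 1) 4)
      else if command == "A" then PySem.List.pySetD ds i (PySem.Int.mod (PySem.List.pyGetD ds i 0 + 2) 4)
      else ds) dirs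

def solution (commands : List String) : Int :=
  let st := commands.foldl (fun (st : List Int × Int) command =>
    let dirs := solutionStepA st.1 command
    (dirs, if PySem.Set.len (PySem.Set.ofList dirs) = 1 then st.2 + 1 else st.2))
    (List.replicate 4 (0 : Int), 0)
  st.2

-- ===== PORT B =====
def solution_alt (commands : List String) : Int :=
  let st := commands.foldl (fun (st : Int × Int) c =>
    let delta := if c == "L" then st.1 + 2 else if c == "R" then st.1 - 2 else st.1
    (delta, if PySem.Int.mod delta 4 = 0 then st.2 + 1 else st.2))
    (0, 0)
  st.2

-- ===== PRECONDITION & SPEC =====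
def Spec_solution (commands : List String) (out : Int) : Prop := out = solution_alt commands
instance (commands : List String) (out : Int) : Decidable (Spec_solution commands out) := by unfold Spec_solution; infer_instance

-- ===== CLAIM (what is proved, stated in full; the proofs are below) =====
def Claim_equal_solution : Prop := ∀ (commands : List String), Dom_solution commands → Spec_solution commands (solution commands)

-- ===== LEMMAS AND PROOFS =====

-- A's directions list after any prefix is [a, b, a, a]: this lemma evaluates one step of A on that shape.
theorem solutionStepA_eval (a b : Int) (c : String) :
    solutionStepA [a, b, a, a] c =
      if c == "L" then [PySem.Int.mod (a - 1) 4, PySem.Int.mod (b + 1) 4,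
                        PySem.Int.mod (a - 1) 4, PySem.Int.mod (a - 1) 4]
      else if c == "R" then [PySem.Int.mod (a + 1) 4, PySem.Int.mod (b - 1) 4,
                        PySem.Int.mod (a + 1) 4, PySem.Int.mod (a + 1) 4]
      else if c == "A" then [PySem.Int.mod (a + 2) 4, PySem.Int.mod (b + 2) 4,
                        PySem.Int.mod (a + 2) 4, PySem.Int.mod (a + 2) 4]
      else [a, b, a, a] := by
  have hr : PySem.List.pyRange 0 4 1 = [0, 1, 2, 3] := by decide
  by_cases hL : c = "L" <;> by_cases hR : c = "R" <;> by_cases hA : c = "A" <;>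
    simp_all [solutionStepA, PySem.List.pySetD, PySem.List.pySet?,
      PySem.List.pyGetD, PySem.List.pyGet?, PySem.List.pyIdx?]

-- len(set([a, b, a, a])) == 1 is exactly a = b
theorem set_len_quad (a b : Int) :
    PySem.Set.len (PySem.Set.ofList [a, b, a, a]) = 1 ↔ a = b := by
  by_cases h : a = b
  · simp [PySem.Set.ofList, PySem.Set.add, PySem.Set.len, PySem.Set.empty, PySem.Set.contains, h]
  · simp [PySem.Set.ofList, PySem.Set.add, PySem.Set.len, PySem.Set.empty, PySem.Set.contains, h, Ne.symm h]

theorem mod4_eq (x : Int) : PySem.Int.mod x 4 = x % 4 :=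
  PySem.Int.mod_eq_emod_of_pos (by norm_num)

-- Invariant tying A's state (directions, count) to B's state (delta, count):
-- directions = [a, b, a, a] with a, b ∈ [0, 4) and b - a ≡ delta (mod 4), counts equal.
def solutionInv (sa : List Int × Int) (sb : Int × Int) : Prop :=
  ∃ a b : Int, 0 ≤ a ∧ a < 4 ∧ 0 ≤ b ∧ b < 4 ∧ sa.1 = [a, b, a, a] ∧
    (b - a - sb.1) % 4 = 0 ∧ sa.2 = sb.2

theorem solutionInv_step (sa : List Int × Int) (sb : Int × Int) (c : String)
    (h : solutionInv sa sb) :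
    solutionInv
      (solutionStepA sa.1 c,
        if PySem.Set.len (PySem.Set.ofList (solutionStepA sa.1 c)) = 1 then sa.2 + 1 else sa.2)
      ((if c == "L" then sb.1 + 2 else if c == "R" then sb.1 - 2 else sb.1),
        if PySem.Int.mod (if c == "L" then sb.1 + 2 else if c == "R" then sb.1 - 2 else sb.1) 4 = 0
        then sb.2 + 1 else sb.2) := by
  obtain ⟨a, b, ha0, ha4, hb0, hb4, hdirs, hmod, hcnt⟩ := h
  rw [hdirs, solutionStepA_eval]
  have m0 : ∀ x : Int, 0 ≤ PySem.Int.mod x 4 := fun x => PySem.Int.mod_nonneg x (by norm_num)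
  have m4 : ∀ x : Int, PySem.Int.mod x 4 < 4 := fun x => PySem.Int.mod_lt x (by norm_num)
  by_cases hL : c = "L"
  · subst hL
    simp only [beq_self_eq_true, if_true]
    refine ⟨PySem.Int.mod (a - 1) 4, PySem.Int.mod (b + 1) 4, m0 _, m4 _, m0 _, m4 _, rfl, ?_, ?_⟩
    · simp only [mod4_eq]; omega
    · simp only [set_len_quad]
      simp only [mod4_eq]
      split_ifs with h1 h2 h2 <;> omega
  · by_cases hR : c = "R"
    · subst hR
      simp only [beq_iff_eq, if_neg hL, reduceIte]
      refine ⟨PySem.Int.mod (a + 1) 4, PySem.Int.mod (b - 1) 4, m0 _, m4 _, m0 _, m4 _, rfl, ?_, ?_⟩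
      · simp only [mod4_eq]; omega
      · simp only [set_len_quad]
        simp only [mod4_eq]
        split_ifs with h1 h2 h2 <;> omega
    · by_cases hA : c = "A"
      · subst hA
        simp only [beq_iff_eq, if_neg hL, if_neg hR, reduceIte]
        refine ⟨PySem.Int.mod (a + 2) 4, PySem.Int.mod (b + 2) 4, m0 _, m4 _, m0 _, m4 _, rfl, ?_, ?_⟩
        · simp only [mod4_eq]; omega
        · simp only [set_len_quad]
          simp only [mod4_eq]
          split_ifs with h1 h2 h2 <;> omega
      · simp only [beq_iff_eq, if_neg hL, if_neg hR, if_neg hA]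
        refine ⟨a, b, ha0, ha4, hb0, hb4, rfl, hmod, ?_⟩
        simp only [set_len_quad]
        simp only [mod4_eq]
        split_ifs with h1 h2 h2 <;> omega

theorem solutionInv_foldl (commands : List String) (sa : List Int × Int) (sb : Int × Int)
    (h : solutionInv sa sb) :
    solutionInv
      (commands.foldl (fun st command =>
        let dirs := solutionStepA st.1 command
        (dirs, if PySem.Set.len (PySem.Set.ofList dirs) = 1 then st.2 + 1 else st.2)) sa)
      (commands.foldl (fun st c =>
        let delta := if c == "L" then st.1 + 2 else if c == "R" then st.1 - 2 else st.1
        (delta, if PySem.Int.mod delta 4 = 0 then st.2 + 1 else st.2)) sb) := by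
  induction commands generalizing sa sb with
  | nil => exact h
  | cons c cs ih => exact ih _ _ (solutionInv_step sa sb c h)

-- ===== VERDICT (by name: the statement is the Claim_ definition above) =====
theorem solution_spec : Claim_equal_solution := by
  intro commands _
  unfold Spec_solution solution solution_alt
  have h := solutionInv_foldl commands (List.replicate 4 (0 : Int), 0) (0, 0)
    ⟨0, 0, by norm_num, by norm_num, by norm_num, by norm_num, by decide, by decide, rfl⟩
  obtain ⟨_, _, _, _, _, _, _, _, hcnt⟩ := h
  simpa using hcnt
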